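-- pv_equiv track=rewrite | github.com/tait-py/KineticProofreadingCdc48 | lib/processive_locator_detail.py | split_idx_regions_on_idx
-- ===== SOURCE A (Python) =====
-- def split_idx_regions_on_idx(regions, splits):
--     """
--     Given a set of regions defined by their (integer) index and a list of split indexes, splits
--     each region overlapping a split index into two discrete regions.
--
--     Arguments:
--         regions (list of (tuple of int)): indexes defining the start/end points of a set of regions.
--         splits (list of int): indexes where regions should be split, if they overlap there.
--
--     Returns:
--         regions (list of (tuple of int)): indexes defining the start/end points of a set of regions,
--                                           after splitting.
--     """
--     # split on slipback centre points
--     output_regions = []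
--     for i_lo, i_hi in regions:
--         splitpoints = [i_lo] + [sm for sm in splits if i_lo < sm and sm < i_hi] + [i_hi]
--         for i, (split_start, split_end) in enumerate(zip(splitpoints, splitpoints[1:])):
--             truncated_lo = False if i == 0 else True
--             truncated_hi = False if i == (len(splitpoints) - 2) else True
--             output_regions += [(split_start, split_end, truncated_lo, truncated_hi)]
--
--     return output_regions
-- ===== SOURCE B (Python) =====
-- def split_idx_regions_on_idx(regions, splits):
--     """Two staged passes with transposed loops: first scatter each split (in
--     input order) into a per-region buffer, then emit each region's pieces with
--     a running 'prev' endpoint; order of splits is preserved because the outer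
--     scatter loop runs over splits."""
--     pending = [[] for _ in regions]
--     buffers = list(zip(pending, regions))
--     for s in splits:
--         for buf, (lo, hi) in buffers:
--             if lo < s < hi:
--                 buf.append(s)
--     out = []
--     for (lo, hi), mids in zip(regions, pending):
--         prev, trunc = lo, False
--         for s in mids:
--             out.append((prev, s, trunc, True))
--             prev, trunc = s, True
--         out.append((prev, hi, trunc, False))
--     return out
-- ===== Notes on version B (the rewrite author's own statement) =====
-- stated objective: alternative
-- what changed: B transposes the loop nest: a scatter pass over splits distributes each split (in input order) into per-region buffers via zip, then a second pass emits each region's pieces with a running prev-endpoint/flag accumulator, replacing A's per-region filter + splitpoints list + enumerate/zip with index arithmetic.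
import Mathlib
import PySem

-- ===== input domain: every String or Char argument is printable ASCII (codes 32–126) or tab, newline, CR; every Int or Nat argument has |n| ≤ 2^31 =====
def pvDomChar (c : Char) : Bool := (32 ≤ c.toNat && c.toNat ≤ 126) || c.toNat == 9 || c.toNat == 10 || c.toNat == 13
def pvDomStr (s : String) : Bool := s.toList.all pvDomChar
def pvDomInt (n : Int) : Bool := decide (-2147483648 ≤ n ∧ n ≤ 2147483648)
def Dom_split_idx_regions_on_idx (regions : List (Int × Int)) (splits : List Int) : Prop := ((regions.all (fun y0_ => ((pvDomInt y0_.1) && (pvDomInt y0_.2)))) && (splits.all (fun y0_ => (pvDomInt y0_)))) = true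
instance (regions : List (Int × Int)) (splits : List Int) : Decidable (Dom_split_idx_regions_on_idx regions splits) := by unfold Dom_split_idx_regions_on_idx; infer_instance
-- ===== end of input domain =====

-- B transposes the loop nest (scatter pass over splits into per-region buffers,
-- then an emit pass with a running prev-endpoint accumulator); objective: alternative.

-- ===== PORT A =====
def split_idx_regions_on_idx (regions : List (Int × Int)) (splits : List Int) : List (Int × Int × Bool × Bool) :=
  regions.foldl (fun output_regions r =>
    let i_lo := r.1
    let i_hi := r.2
    let splitpoints : List Int :=
      [i_lo] ++ splits.filter (fun sm => decide (i_lo < sm) && decide (sm < i_hi)) ++ [i_hi]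
    (PySem.List.enumerate (splitpoints.zip splitpoints.tail) 0).foldl
      (fun acc p =>
        let truncated_lo : Bool := if p.1 == 0 then false else true
        let truncated_hi : Bool := if p.1 == (splitpoints.length : Int) - 2 then false else true
        acc ++ [(p.2.1, p.2.2, truncated_lo, truncated_hi)])
      output_regions) []

-- ===== PORT B =====
-- pass 1: scatter each split (in input order) into a per-region buffer
-- pass 2: emit each region's pieces with running (prev, trunc) state
def split_idx_regions_on_idx_alt (regions : List (Int × Int)) (splits : List Int) : List (Int × Int × Bool × Bool) :=
  let pending : List (List Int) :=
    splits.foldl (fun pending s =>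
      (pending.zip regions).map (fun p =>
        if p.2.1 < s ∧ s < p.2.2 then p.1 ++ [s] else p.1))
      (regions.map (fun _ => ([] : List Int)))
  (regions.zip pending).foldl (fun out p =>
    let lo := p.1.1
    let hi := p.1.2
    let st : Int × Bool × List (Int × Int × Bool × Bool) :=
      p.2.foldl (fun st s => (s, true, st.2.2 ++ [(st.1, s, st.2.1, true)])) (lo, false, out)
    st.2.2 ++ [(st.1, hi, st.2.1, false)]) []

-- ===== PRECONDITION & SPEC =====
def Spec_split_idx_regions_on_idx (regions : List (Int × Int)) (splits : List Int) (out : List (Int × Int × Bool × Bool)) : Prop := out = split_idx_regions_on_idx_alt regions splits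
instance (regions : List (Int × Int)) (splits : List Int) (out : List (Int × Int × Bool × Bool)) : Decidable (Spec_split_idx_regions_on_idx regions splits out) := by unfold Spec_split_idx_regions_on_idx; infer_instance

-- ===== CLAIM (what is proved, stated in full; the proofs are below) =====
def Claim_equal_split_idx_regions_on_idx : Prop := ∀ (regions : List (Int × Int)) (splits : List Int), Dom_split_idx_regions_on_idx regions splits → Spec_split_idx_regions_on_idx regions splits (split_idx_regions_on_idx regions splits)

-- ===== LEMMAS AND PROOFS =====

-- append-accumulator foldl is map
theorem foldl_app_map {α β : Type} (f : α → β) :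
    ∀ (l : List α) (out : List β),
      l.foldl (fun acc p => acc ++ [f p]) out = out ++ l.map f := by
  intro l
  induction l with
  | nil => simp
  | cons x xs ih => intro out; simp [List.foldl, ih]

theorem getLast!_cons_cons (a b : Int) (l : List Int) :
    (a :: b :: l).getLast! = (b :: l).getLast! := by
  simp [List.getLast!, List.getLast]

-- the tail of A's enumerated piece list (index ≥ 1) is the middle pieces plus last piece
theorem midlem :
    ∀ (mid : List Int) (m0 hi : Int) (j : Int), 0 ≤ j →
      (PySem.List.enumerate (((m0 :: mid ++ [hi]).zip ((m0 :: mid ++ [hi]).tail))) (j + 1)).map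
        (fun p => (p.2.1, p.2.2,
          (if p.1 == 0 then false else true),
          (if p.1 == j + 1 + (mid.length : Int) then false else true)))
      = ((m0 :: mid).zip mid).map (fun q => (q.1, q.2, true, true))
          ++ [((m0 :: mid).getLast!, hi, true, false)] := by
  intro mid
  induction mid with
  | nil =>
      intro m0 hi j hj
      simp [PySem.List.enumerate, List.getLast!]
      omega
  | cons m1 rest ih =>
      intro m0 hi j hj
      have h := ih m1 hi (j + 1) (by omega)
      simp only [List.cons_append, List.zip_cons_cons, List.tail_cons,
        PySem.List.enumerate_cons, List.map_cons] at h ⊢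
      rw [getLast!_cons_cons]
      have h1 : ((j + 1 : Int) == 0) = false := by
        rw [beq_eq_false_iff_ne]; omega
      have h2 : ((j + 1 : Int) == j + 1 + ((m1 :: rest).length : Int)) = false := by
        rw [beq_eq_false_iff_ne]; simp only [List.length_cons]; push_cast; omega
      simp only [h1, h2, Bool.false_eq_true, if_false]
      have e : j + 1 + ((m1 :: rest).length : Int) = j + 1 + 1 + (rest.length : Int) := by
        simp only [List.length_cons]; push_cast; ring
      rw [e, h]

-- A's per-region body in let-free form equals the case-analysis form over the interior splits
theorem body_eq (lo hi : Int) (splits : List Int) (out : List (Int × Int × Bool × Bool)) :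
    (PySem.List.enumerate
        ((([lo] ++ splits.filter (fun sm => decide (lo < sm) && decide (sm < hi)) ++ [hi]).zip
          ([lo] ++ splits.filter (fun sm => decide (lo < sm) && decide (sm < hi)) ++ [hi]).tail)) 0).foldl
      (fun acc p =>
        acc ++ [(p.2.1, p.2.2,
          (if p.1 == 0 then false else true),
          (if p.1 == (([lo] ++ splits.filter (fun sm => decide (lo < sm) && decide (sm < hi)) ++ [hi]).length : Int) - 2 then false else true))])
      out
    = (match splits.filter (fun s => decide (lo < s) && decide (s < hi)) with
       | [] => out ++ [(lo, hi, false, false)]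
       | m0 :: _ =>
         out ++ [(lo, m0, false, true)]
             ++ ((splits.filter (fun s => decide (lo < s) && decide (s < hi))).zip
                 (splits.filter (fun s => decide (lo < s) && decide (s < hi))).tail).map
                   (fun q => (q.1, q.2, true, true))
             ++ [((splits.filter (fun s => decide (lo < s) && decide (s < hi))).getLast!, hi, true, false)]) := by
  rw [foldl_app_map]
  rcases hm : splits.filter (fun s => decide (lo < s) && decide (s < hi)) with _ | ⟨m0, rest⟩
  · simp [PySem.List.enumerate]
  · simp only [List.cons_append, List.nil_append, List.zip_cons_cons, List.tail_cons,
      PySem.List.enumerate_cons, List.map_cons]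
    have h := midlem rest m0 hi 0 (le_refl 0)
    simp only [zero_add, List.cons_append, List.tail_cons] at h
    have h1 : ((0 : Int) == 0) = true := by simp
    have h2 : ((0 : Int) == ((lo :: (m0 :: rest) ++ [hi]).length : Int) - 2) = false := by
      rw [beq_eq_false_iff_ne]
      simp only [List.length_cons, List.length_append, List.length_nil]
      push_cast; omega
    have e : (((lo :: (m0 :: rest) ++ [hi]).length : Int)) - 2 = 0 + 1 + (rest.length : Int) := by
      simp only [List.length_cons, List.length_append, List.length_nil]
      push_cast; ring
    simp only [List.cons_append] at h2 e ⊢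
    simp only [h1, h2, if_true, Bool.false_eq_true, if_false]
    simp only [e, zero_add]
    rw [h]
    simp

-- one scatter step over the zipped buffers is a pointwise conditional append
theorem zip_map_update (s : Int) (g : (Int × Int) → List Int) :
    ∀ (rs : List (Int × Int)),
      ((rs.map g).zip rs).map (fun p =>
        if p.2.1 < s ∧ s < p.2.2 then p.1 ++ [s] else p.1)
      = rs.map (fun r => g r ++ if decide (r.1 < s) && decide (s < r.2) then [s] else []) := by
  intro rs
  induction rs with
  | nil => simp
  | cons r rest ih =>
      simp only [List.map_cons, List.zip_cons_cons, ih]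
      by_cases h : r.1 < s ∧ s < r.2
      · simp [h]
      · have hb : (decide (r.1 < s) && decide (s < r.2)) = false := by
          rw [Bool.and_eq_false_iff]
          rcases not_and_or.mp h with h1 | h1
          · left; simpa using h1
          · right; simpa using h1
        simp [h, hb]

-- B's scatter pass computes, per region, the filter of splits in input order
theorem scatter_eq (regions : List (Int × Int)) :
    ∀ (splits : List Int) (g : (Int × Int) → List Int),
      splits.foldl (fun pending s =>
        ((pending.zip regions).map (fun p =>
          if p.2.1 < s ∧ s < p.2.2 then p.1 ++ [s] else p.1)))
        (regions.map g)
      = regions.map (fun r => g r ++ splits.filter (fun s => decide (r.1 < s) && decide (s < r.2))) := by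
  intro splits
  induction splits with
  | nil => intro g; simp
  | cons s ss ih =>
      intro g
      simp only [List.foldl_cons]
      rw [zip_map_update s g regions, ih]
      apply List.map_congr_left
      intro r _
      by_cases h : (decide (r.1 < s) && decide (s < r.2)) = true
      · simp [h]
      · simp only [Bool.not_eq_true] at h
        simp [h]

-- a list zipped with its own map is a map of pairs
theorem zip_map_self {α β : Type} (f : α → β) :
    ∀ (l : List α), l.zip (l.map f) = l.map (fun a => (a, f a)) := by
  intro l
  induction l with
  | nil => rfl
  | cons x xs ih => simp [ih]

-- chain form of B's emit loop
def emitGo (hi : Int) : Int → Bool → List Int → List (Int × Int × Bool × Bool)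
  | prev, t, [] => [(prev, hi, t, false)]
  | prev, t, s :: ss => (prev, s, t, true) :: emitGo hi s true ss

theorem emit_fold_eq (hi : Int) :
    ∀ (mids : List Int) (prev : Int) (t : Bool) (acc : List (Int × Int × Bool × Bool)),
      (mids.foldl (fun (st : Int × Bool × List (Int × Int × Bool × Bool)) s =>
          (s, true, st.2.2 ++ [(st.1, s, st.2.1, true)])) (prev, t, acc)).2.2
        ++ [((mids.foldl (fun (st : Int × Bool × List (Int × Int × Bool × Bool)) s =>
          (s, true, st.2.2 ++ [(st.1, s, st.2.1, true)])) (prev, t, acc)).1, hi,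
          (mids.foldl (fun (st : Int × Bool × List (Int × Int × Bool × Bool)) s =>
          (s, true, st.2.2 ++ [(st.1, s, st.2.1, true)])) (prev, t, acc)).2.1, false)]
      = acc ++ emitGo hi prev t mids := by
  intro mids
  induction mids with
  | nil => intro prev t acc; simp [emitGo]
  | cons s ss ih =>
      intro prev t acc
      simp only [List.foldl_cons, emitGo]
      rw [ih s true (acc ++ [(prev, s, t, true)])]
      simp

-- the chain form started at (prev, true) is middle pieces plus last piece
theorem emitGo_true (hi : Int) :
    ∀ (rest : List Int) (m0 : Int),
      emitGo hi m0 true rest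
      = ((m0 :: rest).zip rest).map (fun q => (q.1, q.2, true, true))
          ++ [((m0 :: rest).getLast!, hi, true, false)] := by
  intro rest
  induction rest with
  | nil => intro m0; simp [emitGo, List.getLast!]
  | cons m1 rs ih =>
      intro m0
      simp only [emitGo, List.zip_cons_cons, List.map_cons, List.cons_append]
      rw [getLast!_cons_cons, ih m1]

-- chain form equals A's case-analysis form
theorem emitGo_case (lo hi : Int) (mid : List Int) :
    emitGo hi lo false mid
    = (match mid with
       | [] => [(lo, hi, false, false)]
       | m0 :: _ =>
         [(lo, m0, false, true)]
             ++ (mid.zip mid.tail).map (fun q => (q.1, q.2, true, true))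
             ++ [(mid.getLast!, hi, true, false)]) := by
  rcases mid with _ | ⟨m0, rest⟩
  · simp [emitGo]
  · simp only [emitGo, List.tail_cons]
    rw [emitGo_true hi rest m0]
    simp

-- both folds over regions agree
theorem folds_eq (splits : List Int) :
    ∀ (regions : List (Int × Int)) (out : List (Int × Int × Bool × Bool)),
      regions.foldl (fun output_regions r =>
        (PySem.List.enumerate
            ((([r.1] ++ splits.filter (fun sm => decide (r.1 < sm) && decide (sm < r.2)) ++ [r.2]).zip
              ([r.1] ++ splits.filter (fun sm => decide (r.1 < sm) && decide (sm < r.2)) ++ [r.2]).tail)) 0).foldl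
          (fun acc p =>
            acc ++ [(p.2.1, p.2.2,
              (if p.1 == 0 then false else true),
              (if p.1 == (([r.1] ++ splits.filter (fun sm => decide (r.1 < sm) && decide (sm < r.2)) ++ [r.2]).length : Int) - 2 then false else true))])
          output_regions) out
      = regions.foldl (fun out r =>
          out ++ emitGo r.2 r.1 false (splits.filter (fun s => decide (r.1 < s) && decide (s < r.2)))) out := by
  intro regions
  induction regions with
  | nil => intro out; rfl
  | cons r rs ih =>
      intro out
      simp only [List.foldl_cons]
      rw [body_eq r.1 r.2 splits out, emitGo_case r.1 r.2]
      rcases hm : splits.filter (fun s => decide (r.1 < s) && decide (s < r.2)) with _ | ⟨m0, rest⟩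
      · rw [ih]
      · simp only [List.append_assoc] at *
        rw [ih]

-- ===== VERDICT (by name: the statement is the Claim_ definition above) =====
theorem split_idx_regions_on_idx_spec : Claim_equal_split_idx_regions_on_idx := by
  intro regions splits _
  unfold Spec_split_idx_regions_on_idx split_idx_regions_on_idx split_idx_regions_on_idx_alt
  rw [scatter_eq regions splits (fun _ => [])]
  simp only [List.nil_append]
  have hz := zip_map_self (fun r : Int × Int => splits.filter (fun s => decide (r.1 < s) && decide (s < r.2))) regions
  rw [hz, List.foldl_map]
  rw [folds_eq splits regions []]
  apply List.foldl_ext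
  intro acc r _
  exact (emit_fold_eq r.2 (splits.filter (fun s => decide (r.1 < s) && decide (s < r.2))) r.1 false acc).symm
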